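-- pv_equiv track=rewrite | github.com/antonellobenincasa/referencia-ImportaYAia-python | SalesModule/reports/quote_pdf_generator.py | get_equivalent_ports
-- ===== SOURCE A (Python) =====
-- EQUIVALENT_PORTS = {
--     'GUANGZHOU': ['HUANGPU', 'GUANGZHOU', 'HUANGPU-GUANGZHOU'],
--     'HUANGPU': ['HUANGPU', 'GUANGZHOU', 'HUANGPU-GUANGZHOU'],
--     'HUANGPU-GUANGZHOU': ['HUANGPU', 'GUANGZHOU', 'HUANGPU-GUANGZHOU'],
--     'TIANJIN': ['TIANJIN', 'XINGANG', 'TIANJIN-XINGANG'],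
--     'XINGANG': ['TIANJIN', 'XINGANG', 'TIANJIN-XINGANG'],
--     'TIANJIN-XINGANG': ['TIANJIN', 'XINGANG', 'TIANJIN-XINGANG'],
--     'SHENZHEN': ['SHENZHEN', 'SHEKOU', 'YANTIAN'],
--     'SHEKOU': ['SHENZHEN', 'SHEKOU'],
--     'YANTIAN': ['SHENZHEN', 'YANTIAN'],
-- }
--
-- def get_equivalent_ports(port_name):
--     """Get list of equivalent ports for a given port name"""
--     port_upper = port_name.upper().strip()
--     if port_upper in EQUIVALENT_PORTS:
--         return EQUIVALENT_PORTS[port_upper]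
--     for key, equivalents in EQUIVALENT_PORTS.items():
--         if port_upper in [e.upper() for e in equivalents]:
--             return equivalents
--     return [port_name]
-- ===== SOURCE B (Python) =====
-- EQUIVALENT_PORTS = {
--     'GUANGZHOU': ['HUANGPU', 'GUANGZHOU', 'HUANGPU-GUANGZHOU'],
--     'HUANGPU': ['HUANGPU', 'GUANGZHOU', 'HUANGPU-GUANGZHOU'],
--     'HUANGPU-GUANGZHOU': ['HUANGPU', 'GUANGZHOU', 'HUANGPU-GUANGZHOU'],
--     'TIANJIN': ['TIANJIN', 'XINGANG', 'TIANJIN-XINGANG'],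
--     'XINGANG': ['TIANJIN', 'XINGANG', 'TIANJIN-XINGANG'],
--     'TIANJIN-XINGANG': ['TIANJIN', 'XINGANG', 'TIANJIN-XINGANG'],
--     'SHENZHEN': ['SHENZHEN', 'SHEKOU', 'YANTIAN'],
--     'SHEKOU': ['SHENZHEN', 'SHEKOU'],
--     'YANTIAN': ['SHENZHEN', 'YANTIAN'],
-- }
--
-- # Inverse lookup table built once at import time: fallback entries first
-- # (first key wins ties), then direct keys overwrite for priority.
-- PORT_INDEX = {}
-- for _eqs in EQUIVALENT_PORTS.values():
--     for _name in _eqs: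
--         PORT_INDEX.setdefault(_name.upper(), _eqs)
-- for _key, _eqs in EQUIVALENT_PORTS.items():
--     PORT_INDEX[_key] = _eqs
--
--
-- def get_equivalent_ports(port_name):
--     """Get list of equivalent ports for a given port name"""
--     return PORT_INDEX.get(port_name.upper().strip(), [port_name])
-- ===== Notes on version B (the rewrite author's own statement) =====
-- stated objective: idiomatic
-- what changed: B precomputes a single inverse lookup table PORT_INDEX at module load (setdefault for fallback entries, then direct-key overwrite) so the function body is one dict .get with default, replacing A's per-call membership check plus fallback scan over all table entries.
import Mathlib
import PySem

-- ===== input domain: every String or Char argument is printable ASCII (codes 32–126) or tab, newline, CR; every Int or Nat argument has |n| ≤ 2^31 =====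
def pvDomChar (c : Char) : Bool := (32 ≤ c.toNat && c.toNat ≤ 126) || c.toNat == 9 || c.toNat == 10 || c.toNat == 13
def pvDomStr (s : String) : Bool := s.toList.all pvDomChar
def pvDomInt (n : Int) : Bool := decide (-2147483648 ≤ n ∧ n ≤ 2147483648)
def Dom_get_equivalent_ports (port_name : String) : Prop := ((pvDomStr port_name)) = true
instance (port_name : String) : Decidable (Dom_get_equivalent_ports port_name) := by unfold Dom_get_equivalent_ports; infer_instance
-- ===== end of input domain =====

set_option maxRecDepth 4096


-- B replaces A's per-call fallback scan over the table by a single lookup in an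
-- inverse index built once at module load (objective: idiomatic).

-- module-level constant EQUIVALENT_PORTS (shared module context of A and B)
def pvEQUIVALENT_PORTS : List (String × List String) :=
  [ ("GUANGZHOU", ["HUANGPU", "GUANGZHOU", "HUANGPU-GUANGZHOU"]),
    ("HUANGPU", ["HUANGPU", "GUANGZHOU", "HUANGPU-GUANGZHOU"]),
    ("HUANGPU-GUANGZHOU", ["HUANGPU", "GUANGZHOU", "HUANGPU-GUANGZHOU"]),
    ("TIANJIN", ["TIANJIN", "XINGANG", "TIANJIN-XINGANG"]),
    ("XINGANG", ["TIANJIN", "XINGANG", "TIANJIN-XINGANG"]),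
    ("TIANJIN-XINGANG", ["TIANJIN", "XINGANG", "TIANJIN-XINGANG"]),
    ("SHENZHEN", ["SHENZHEN", "SHEKOU", "YANTIAN"]),
    ("SHEKOU", ["SHENZHEN", "SHEKOU"]),
    ("YANTIAN", ["SHENZHEN", "YANTIAN"]) ]

-- ===== PORT A =====
-- the 'for key, equivalents in EQUIVALENT_PORTS.items()' fallback loop of A
def pvFindLoop (port_upper port_name : String) : List (String × List String) → List String
  | [] => [port_name]
  | (_, eqs) :: rest =>
      if port_upper ∈ eqs.map PySem.Str.upper then eqs
      else pvFindLoop port_upper port_name rest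

def get_equivalent_ports (port_name : String) : List String :=
  let port_upper := PySem.Str.strip (PySem.Str.upper port_name)
  match (PySem.Dict.mk pvEQUIVALENT_PORTS).get? port_upper with
  | some v => v
  | none => pvFindLoop port_upper port_name pvEQUIVALENT_PORTS

-- ===== PORT B =====
-- PORT_INDEX, built once at module level: fallback entries via setdefault
-- (first key wins ties), then direct keys overwrite.
def pvPORT_INDEX : PySem.Dict String (List String) :=
  let d := pvEQUIVALENT_PORTS.foldl
    (fun d kv => kv.2.foldl (fun d name => d.setdefault (PySem.Str.upper name) kv.2) d)
    PySem.Dict.empty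
  pvEQUIVALENT_PORTS.foldl (fun d kv => d.insert kv.1 kv.2) d

def get_equivalent_ports_alt (port_name : String) : List String :=
  pvPORT_INDEX.getD (PySem.Str.strip (PySem.Str.upper port_name)) [port_name]

-- ===== PRECONDITION & SPEC =====
def Spec_get_equivalent_ports (port_name : String) (out : List String) : Prop := out = get_equivalent_ports_alt port_name
instance (port_name : String) (out : List String) : Decidable (Spec_get_equivalent_ports port_name out) := by unfold Spec_get_equivalent_ports; infer_instance

-- ===== CLAIM (what is proved, stated in full; the proofs are below) =====
def Claim_equal_get_equivalent_ports : Prop := ∀ (port_name : String), Dom_get_equivalent_ports port_name → Spec_get_equivalent_ports port_name (get_equivalent_ports port_name)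

-- ===== LEMMAS AND PROOFS =====

-- the built index, evaluated once and for all
lemma pvPORT_INDEX_eq : pvPORT_INDEX = PySem.Dict.mk
  [ ("HUANGPU", ["HUANGPU", "GUANGZHOU", "HUANGPU-GUANGZHOU"]),
    ("GUANGZHOU", ["HUANGPU", "GUANGZHOU", "HUANGPU-GUANGZHOU"]),
    ("HUANGPU-GUANGZHOU", ["HUANGPU", "GUANGZHOU", "HUANGPU-GUANGZHOU"]),
    ("TIANJIN", ["TIANJIN", "XINGANG", "TIANJIN-XINGANG"]),
    ("XINGANG", ["TIANJIN", "XINGANG", "TIANJIN-XINGANG"]),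
    ("TIANJIN-XINGANG", ["TIANJIN", "XINGANG", "TIANJIN-XINGANG"]),
    ("SHENZHEN", ["SHENZHEN", "SHEKOU", "YANTIAN"]),
    ("SHEKOU", ["SHENZHEN", "SHEKOU"]),
    ("YANTIAN", ["SHENZHEN", "YANTIAN"]) ] := by decide

-- key case helper: both lookups hit the same entry
lemma pv_key (u p : String) (v : List String)
    (hg : (PySem.Dict.mk pvEQUIVALENT_PORTS).get? u = some v)
    (hi : pvPORT_INDEX.get? u = some v) :
    (match (PySem.Dict.mk pvEQUIVALENT_PORTS).get? u with
     | some v => v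
     | none => pvFindLoop u p pvEQUIVALENT_PORTS)
    = pvPORT_INDEX.getD u [p] := by
  rw [hg, PySem.Dict.getD_eq_get?_getD, hi]
  rfl

-- the core agreement, for an arbitrary already-normalised key u
lemma pv_core (u p : String) :
    (match (PySem.Dict.mk pvEQUIVALENT_PORTS).get? u with
     | some v => v
     | none => pvFindLoop u p pvEQUIVALENT_PORTS)
    = pvPORT_INDEX.getD u [p] := by
  have m1 : (["HUANGPU", "GUANGZHOU", "HUANGPU-GUANGZHOU"].map PySem.Str.upper)
      = ["HUANGPU", "GUANGZHOU", "HUANGPU-GUANGZHOU"] := by decide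
  have m2 : (["TIANJIN", "XINGANG", "TIANJIN-XINGANG"].map PySem.Str.upper)
      = ["TIANJIN", "XINGANG", "TIANJIN-XINGANG"] := by decide
  have m3 : (["SHENZHEN", "SHEKOU", "YANTIAN"].map PySem.Str.upper)
      = ["SHENZHEN", "SHEKOU", "YANTIAN"] := by decide
  have m4 : (["SHENZHEN", "SHEKOU"].map PySem.Str.upper) = ["SHENZHEN", "SHEKOU"] := by decide
  have m5 : (["SHENZHEN", "YANTIAN"].map PySem.Str.upper) = ["SHENZHEN", "YANTIAN"] := by decide
  by_cases h1 : u = "GUANGZHOU"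
  · subst h1; exact pv_key "GUANGZHOU" p ["HUANGPU", "GUANGZHOU", "HUANGPU-GUANGZHOU"] (by decide) (by decide)
  by_cases h2 : u = "HUANGPU"
  · subst h2; exact pv_key "HUANGPU" p ["HUANGPU", "GUANGZHOU", "HUANGPU-GUANGZHOU"] (by decide) (by decide)
  by_cases h3 : u = "HUANGPU-GUANGZHOU"
  · subst h3; exact pv_key "HUANGPU-GUANGZHOU" p ["HUANGPU", "GUANGZHOU", "HUANGPU-GUANGZHOU"] (by decide) (by decide)
  by_cases h4 : u = "TIANJIN"
  · subst h4; exact pv_key "TIANJIN" p ["TIANJIN", "XINGANG", "TIANJIN-XINGANG"] (by decide) (by decide)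
  by_cases h5 : u = "XINGANG"
  · subst h5; exact pv_key "XINGANG" p ["TIANJIN", "XINGANG", "TIANJIN-XINGANG"] (by decide) (by decide)
  by_cases h6 : u = "TIANJIN-XINGANG"
  · subst h6; exact pv_key "TIANJIN-XINGANG" p ["TIANJIN", "XINGANG", "TIANJIN-XINGANG"] (by decide) (by decide)
  by_cases h7 : u = "SHENZHEN"
  · subst h7; exact pv_key "SHENZHEN" p ["SHENZHEN", "SHEKOU", "YANTIAN"] (by decide) (by decide)
  by_cases h8 : u = "SHEKOU"
  · subst h8; exact pv_key "SHEKOU" p ["SHENZHEN", "SHEKOU"] (by decide) (by decide)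
  by_cases h9 : u = "YANTIAN"
  · subst h9; exact pv_key "YANTIAN" p ["SHENZHEN", "YANTIAN"] (by decide) (by decide)
  · have g : ∀ k : String, ¬ u = k → ¬ k = u := fun _ h h' => h h'.symm
    simp [pvEQUIVALENT_PORTS, pvFindLoop, pvPORT_INDEX_eq,
      PySem.Dict.getD_eq_get?_getD,
      m1, m2, m3, m4, m5, h1, h2, h3, h4, h5, h6, h7, h8, h9,
      PySem.Dict.get?, g _ h1, g _ h2, g _ h3, g _ h4, g _ h5, g _ h6, g _ h7, g _ h8, g _ h9]

-- ===== VERDICT (by name: the statement is the Claim_ definition above) =====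
theorem get_equivalent_ports_spec : Claim_equal_get_equivalent_ports := by
  intro p _
  unfold Spec_get_equivalent_ports get_equivalent_ports get_equivalent_ports_alt
  exact pv_core (PySem.Str.strip (PySem.Str.upper p)) p
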